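-- pv_equiv track=rewrite | github.com/Saurabh07703/AI_Portfolio | backend/rag_engine.py | get_generic_response
-- ===== SOURCE A (Python) =====
-- def get_generic_response(query):
--     """
--     Handles generic conversational queries to make the bot feel more natural.
--     """
--     q = query.lower().strip()
--     # Simple tokenization
--     tokens = set(q.replace('?', '').replace('!', '').replace('.', '').split())
--
--     # Extended greetings matching (includes 'hii', 'heya', etc.)
--     greeting_roots = ['hi', 'hello', 'hey', 'greetings', 'hola', 'namaste']
--     is_greeting = any(tok in greeting_roots or (tok.startswith('hi') and len(tok) <= 4) for tok in tokens)
--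
--     if is_greeting:
--          return "Hello! I'm your AI jewelry assistant. I can help you find necklaces, rings, earrings, and more. What are you looking for today?"
--
--     if 'help' in q or 'what can you do' in q:
--          return "I can help you find jewelry based on your preferences. Try asking for 'gold earrings for a wedding' or 'diamond necklace under 50,000'."
--
--     if 'thank' in q or 'thanks' in tokens:
--          return "You're welcome! Let me know if you'd like to see more options."
--
--     if 'how are you' in q:
--          return "I'm doing great, thanks for asking! I'm ready to help you find the perfect piece of jewelry."
--
--     if 'who are you' in q or 'what are you' in q:
--          return "I am an intelligent assistant designed to help you explore our exclusive jewelry collection."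
--
--     # --- General Info for Voice Agent ---
--     if 'time' in q or 'hour' in q or 'open' in q:
--         return "We are open Monday to Saturday from 10 AM to 8 PM. Our online store is open 24/7."
--
--     if 'location' in q or 'address' in q or 'where' in q:
--         return "We are located at 123 Jewelry Lane, Mumbai. You can also find us online at www.aijewelry.com."
--
--     if 'return' in q or 'policy' in q or 'refund' in q:
--         return "We offer a 30-day no-questions-asked return policy on all unworn items with original tags."
--
--     if 'call' in q or 'phone' in q or 'contact' in q:
--         return "You are speaking with our AI representative right now. For human support, please email support@aijewelry.com."
--
--     # --- Simple Chitchat & Personality ---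
--     if 'cool' in tokens or 'nice' in tokens or 'wow' in tokens or 'amazing' in tokens:
--          return "I'm glad you like it! Our collection is truly special."
--
--     if 'bye' in tokens or 'goodbye' in tokens:
--          return "Goodbye! Have a wonderful day."
--
--     if 'stupid' in tokens or 'dumb' in tokens or 'idiot' in tokens:
--          return "I'm still learning and doing my best to help you. Let's try finding some jewelry instead."
--
--     if 'love you' in q:
--          return "That's very kind of you! I love helping you find beautiful things."
--
--     return None
-- ===== SOURCE B (Python) =====
-- # Inverted-index rewrite: every keyword is mapped to the priority of the rule it
-- # belongs to; all matching priorities are collected and the response of the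
-- # smallest (= first in A's ordering) is returned, instead of an ordered chain
-- # of if-statements with first-match short-circuiting.
--
-- GREETING_ROOTS = ('hi', 'hello', 'hey', 'greetings', 'hola', 'namaste')
--
-- # token keyword -> priority of its rule
-- TOKEN_PRIORITY = {
--     'thanks': 2,
--     'cool': 9, 'nice': 9, 'wow': 9, 'amazing': 9,
--     'bye': 10, 'goodbye': 10,
--     'stupid': 11, 'dumb': 11, 'idiot': 11,
-- }
--
-- # substring keyword -> priority of its rule
-- SUB_PRIORITY = [
--     ('help', 1), ('what can you do', 1),
--     ('thank', 2),
--     ('how are you', 3),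
--     ('who are you', 4), ('what are you', 4),
--     ('time', 5), ('hour', 5), ('open', 5),
--     ('location', 6), ('address', 6), ('where', 6),
--     ('return', 7), ('policy', 7), ('refund', 7),
--     ('call', 8), ('phone', 8), ('contact', 8),
--     ('love you', 12),
-- ]
--
-- RESPONSES = {
--     0: "Hello! I'm your AI jewelry assistant. I can help you find necklaces, rings, earrings, and more. What are you looking for today?",
--     1: "I can help you find jewelry based on your preferences. Try asking for 'gold earrings for a wedding' or 'diamond necklace under 50,000'.",
--     2: "You're welcome! Let me know if you'd like to see more options.",
--     3: "I'm doing great, thanks for asking! I'm ready to help you find the perfect piece of jewelry.",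
--     4: "I am an intelligent assistant designed to help you explore our exclusive jewelry collection.",
--     5: "We are open Monday to Saturday from 10 AM to 8 PM. Our online store is open 24/7.",
--     6: "We are located at 123 Jewelry Lane, Mumbai. You can also find us online at www.aijewelry.com.",
--     7: "We offer a 30-day no-questions-asked return policy on all unworn items with original tags.",
--     8: "You are speaking with our AI representative right now. For human support, please email support@aijewelry.com.",
--     9: "I'm glad you like it! Our collection is truly special.",
--     10: "Goodbye! Have a wonderful day.",
--     11: "I'm still learning and doing my best to help you. Let's try finding some jewelry instead.",
--     12: "That's very kind of you! I love helping you find beautiful things.",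
-- }
--
--
-- def _token_priority(tok):
--     if tok in GREETING_ROOTS or (tok.startswith('hi') and len(tok) <= 4):
--         return 0
--     return TOKEN_PRIORITY.get(tok)
--
--
-- def get_generic_response(query):
--     q = query.lower().strip()
--     tokens = set(q.replace('?', '').replace('!', '').replace('.', '').split())
--     cands = [p for p in map(_token_priority, tokens) if p is not None]
--     cands += [p for kw, p in SUB_PRIORITY if kw in q]
--     if not cands:
--         return None
--     return RESPONSES.get(min(cands))
-- ===== Notes on version B (the rewrite author's own statement) =====
-- stated objective: alternative
-- what changed: Replaced the ordered if-chain with first-match short-circuiting by an inverted keyword-to-priority index: every matching keyword contributes its rule's priority to a candidate list (token keywords via a dict lookup per token, substring keywords via one scan of the keyword table), and the response of the minimum collected priority is returned.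
import Mathlib
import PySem

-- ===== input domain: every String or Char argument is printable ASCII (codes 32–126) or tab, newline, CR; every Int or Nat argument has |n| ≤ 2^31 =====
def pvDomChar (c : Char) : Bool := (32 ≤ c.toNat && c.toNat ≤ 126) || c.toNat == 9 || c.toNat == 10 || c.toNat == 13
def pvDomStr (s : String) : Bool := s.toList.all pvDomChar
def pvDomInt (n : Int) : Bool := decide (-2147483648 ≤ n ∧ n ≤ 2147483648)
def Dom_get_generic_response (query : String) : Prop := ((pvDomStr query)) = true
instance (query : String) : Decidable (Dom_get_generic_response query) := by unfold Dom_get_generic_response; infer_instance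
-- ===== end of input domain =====

-- B replaces A's ordered first-match if-chain by an inverted keyword-to-priority index:
-- all matching priorities are collected and the response of the minimum one is returned (objective: alternative).

-- ===== PORT A =====
def get_generic_response (query : String) : Option String :=
  let q := PySem.Str.strip (PySem.Str.lower query)
  let tokens := PySem.Set.ofList
    (PySem.Str.split₀ (PySem.Str.replace (PySem.Str.replace (PySem.Str.replace q "?" "") "!" "") "." ""))
  let greeting_roots := ["hi", "hello", "hey", "greetings", "hola", "namaste"]
  let is_greeting := tokens.any (fun tok =>
    greeting_roots.contains tok || (PySem.Str.startswith tok "hi" && decide (PySem.Str.len tok ≤ 4)))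
  if is_greeting then
    some "Hello! I'm your AI jewelry assistant. I can help you find necklaces, rings, earrings, and more. What are you looking for today?"
  else if PySem.Str.isIn "help" q || PySem.Str.isIn "what can you do" q then
    some "I can help you find jewelry based on your preferences. Try asking for 'gold earrings for a wedding' or 'diamond necklace under 50,000'."
  else if PySem.Str.isIn "thank" q || tokens.contains "thanks" then
    some "You're welcome! Let me know if you'd like to see more options."
  else if PySem.Str.isIn "how are you" q then
    some "I'm doing great, thanks for asking! I'm ready to help you find the perfect piece of jewelry."
  else if PySem.Str.isIn "who are you" q || PySem.Str.isIn "what are you" q then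
    some "I am an intelligent assistant designed to help you explore our exclusive jewelry collection."
  else if PySem.Str.isIn "time" q || PySem.Str.isIn "hour" q || PySem.Str.isIn "open" q then
    some "We are open Monday to Saturday from 10 AM to 8 PM. Our online store is open 24/7."
  else if PySem.Str.isIn "location" q || PySem.Str.isIn "address" q || PySem.Str.isIn "where" q then
    some "We are located at 123 Jewelry Lane, Mumbai. You can also find us online at www.aijewelry.com."
  else if PySem.Str.isIn "return" q || PySem.Str.isIn "policy" q || PySem.Str.isIn "refund" q then
    some "We offer a 30-day no-questions-asked return policy on all unworn items with original tags."
  else if PySem.Str.isIn "call" q || PySem.Str.isIn "phone" q || PySem.Str.isIn "contact" q then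
    some "You are speaking with our AI representative right now. For human support, please email support@aijewelry.com."
  else if tokens.contains "cool" || tokens.contains "nice" || tokens.contains "wow" || tokens.contains "amazing" then
    some "I'm glad you like it! Our collection is truly special."
  else if tokens.contains "bye" || tokens.contains "goodbye" then
    some "Goodbye! Have a wonderful day."
  else if tokens.contains "stupid" || tokens.contains "dumb" || tokens.contains "idiot" then
    some "I'm still learning and doing my best to help you. Let's try finding some jewelry instead."
  else if PySem.Str.isIn "love you" q then
    some "That's very kind of you! I love helping you find beautiful things."
  else
    none

-- ===== PORT B =====
def pvGreetRoots : List String := ["hi", "hello", "hey", "greetings", "hola", "namaste"]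

def pvTokenPriDict : PySem.Dict String Nat := PySem.Dict.mk
  [("thanks", 2),
   ("cool", 9), ("nice", 9), ("wow", 9), ("amazing", 9),
   ("bye", 10), ("goodbye", 10),
   ("stupid", 11), ("dumb", 11), ("idiot", 11)]

def pvSubPriority : List (String × Nat) :=
  [("help", 1), ("what can you do", 1),
   ("thank", 2),
   ("how are you", 3),
   ("who are you", 4), ("what are you", 4),
   ("time", 5), ("hour", 5), ("open", 5),
   ("location", 6), ("address", 6), ("where", 6),
   ("return", 7), ("policy", 7), ("refund", 7),
   ("call", 8), ("phone", 8), ("contact", 8),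
   ("love you", 12)]

def pvResponses : PySem.Dict Nat String := PySem.Dict.mk
  [(0, "Hello! I'm your AI jewelry assistant. I can help you find necklaces, rings, earrings, and more. What are you looking for today?"),
   (1, "I can help you find jewelry based on your preferences. Try asking for 'gold earrings for a wedding' or 'diamond necklace under 50,000'."),
   (2, "You're welcome! Let me know if you'd like to see more options."),
   (3, "I'm doing great, thanks for asking! I'm ready to help you find the perfect piece of jewelry."),
   (4, "I am an intelligent assistant designed to help you explore our exclusive jewelry collection."),
   (5, "We are open Monday to Saturday from 10 AM to 8 PM. Our online store is open 24/7."),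
   (6, "We are located at 123 Jewelry Lane, Mumbai. You can also find us online at www.aijewelry.com."),
   (7, "We offer a 30-day no-questions-asked return policy on all unworn items with original tags."),
   (8, "You are speaking with our AI representative right now. For human support, please email support@aijewelry.com."),
   (9, "I'm glad you like it! Our collection is truly special."),
   (10, "Goodbye! Have a wonderful day."),
   (11, "I'm still learning and doing my best to help you. Let's try finding some jewelry instead."),
   (12, "That's very kind of you! I love helping you find beautiful things.")]

def pvTokenPriority (tok : String) : Option Nat :=
  if pvGreetRoots.contains tok || (PySem.Str.startswith tok "hi" && decide (PySem.Str.len tok ≤ 4)) then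
    some 0
  else
    PySem.Dict.get? pvTokenPriDict tok

def get_generic_response_alt (query : String) : Option String :=
  let q := PySem.Str.strip (PySem.Str.lower query)
  let tokens := PySem.Set.ofList
    (PySem.Str.split₀ (PySem.Str.replace (PySem.Str.replace (PySem.Str.replace q "?" "") "!" "") "." ""))
  let cands := (tokens.map pvTokenPriority).filterMap (fun p => p)
    ++ pvSubPriority.filterMap (fun kp => if PySem.Str.isIn kp.1 q then some kp.2 else none)
  if cands = [] then none
  else PySem.Dict.get? pvResponses (PySem.List.minD cands (fun x => x) 0)

-- ===== PRECONDITION & SPEC =====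
def Spec_get_generic_response (query : String) (out : Option String) : Prop := out = get_generic_response_alt query
instance (query : String) (out : Option String) : Decidable (Spec_get_generic_response query out) := by unfold Spec_get_generic_response; infer_instance

-- ===== CLAIM (what is proved, stated in full; the proofs are below) =====
def Claim_equal_get_generic_response : Prop := ∀ (query : String), Dom_get_generic_response query → Spec_get_generic_response query (get_generic_response query)

-- ===== LEMMAS AND PROOFS =====

-- the 13 rule conditions of A, indexed by priority
def pvCondAt (q : String) (tokens : List String) : Nat → Bool
  | 0 => tokens.any (fun tok =>
      ["hi", "hello", "hey", "greetings", "hola", "namaste"].contains tok ||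
      (PySem.Str.startswith tok "hi" && decide (PySem.Str.len tok ≤ 4)))
  | 1 => PySem.Str.isIn "help" q || PySem.Str.isIn "what can you do" q
  | 2 => PySem.Str.isIn "thank" q || tokens.contains "thanks"
  | 3 => PySem.Str.isIn "how are you" q
  | 4 => PySem.Str.isIn "who are you" q || PySem.Str.isIn "what are you" q
  | 5 => PySem.Str.isIn "time" q || PySem.Str.isIn "hour" q || PySem.Str.isIn "open" q
  | 6 => PySem.Str.isIn "location" q || PySem.Str.isIn "address" q || PySem.Str.isIn "where" q
  | 7 => PySem.Str.isIn "return" q || PySem.Str.isIn "policy" q || PySem.Str.isIn "refund" q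
  | 8 => PySem.Str.isIn "call" q || PySem.Str.isIn "phone" q || PySem.Str.isIn "contact" q
  | 9 => tokens.contains "cool" || tokens.contains "nice" || tokens.contains "wow" || tokens.contains "amazing"
  | 10 => tokens.contains "bye" || tokens.contains "goodbye"
  | 11 => tokens.contains "stupid" || tokens.contains "dumb" || tokens.contains "idiot"
  | 12 => PySem.Str.isIn "love you" q
  | _ => false

-- B's candidate list, as the proofs talk about it
def pvCands (q : String) (tokens : List String) : List Nat :=
  (tokens.map pvTokenPriority).filterMap (fun p => p)
    ++ pvSubPriority.filterMap (fun kp => if PySem.Str.isIn kp.1 q then some kp.2 else none)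

lemma pv_min_eq_of (cands : List Nat) (k : Nat) (hk : k ∈ cands)
    (hmin : ∀ j ∈ cands, k ≤ j) : PySem.List.min? cands (fun x => x) = some k := by
  cases h : PySem.List.min? cands (fun x => x) with
  | none =>
    rw [PySem.List.min?_eq_none_iff] at h
    subst h; cases hk
  | some m =>
    have hm := PySem.List.min?_mem h
    have h1 := PySem.List.min?_isMin h k hk
    have h2 := hmin m hm
    simp only at h1
    have : m = k := le_antisymm h1 h2
    rw [this]

lemma pv_tokenPriority_eq_some (tok : String) (p : Nat) :
    pvTokenPriority tok = some p ↔
      ((pvGreetRoots.contains tok || (PySem.Str.startswith tok "hi" && decide (PySem.Str.len tok ≤ 4))) = true ∧ p = 0)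
      ∨ ((pvGreetRoots.contains tok || (PySem.Str.startswith tok "hi" && decide (PySem.Str.len tok ≤ 4))) = false ∧
          ((tok = "thanks" ∧ p = 2)
           ∨ ((tok = "cool" ∨ tok = "nice" ∨ tok = "wow" ∨ tok = "amazing") ∧ p = 9)
           ∨ ((tok = "bye" ∨ tok = "goodbye") ∧ p = 10)
           ∨ ((tok = "stupid" ∨ tok = "dumb" ∨ tok = "idiot") ∧ p = 11))) := by
  unfold pvTokenPriority
  split
  · rename_i h
    rw [h]
    simp [eq_comm]
  · rename_i h
    rw [Bool.not_eq_true] at h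
    rw [h]
    have hnil : PySem.Dict.get? (PySem.Dict.mk ([] : List (String × Nat))) tok = none := rfl
    simp only [pvTokenPriDict, PySem.Dict.get?_mk_cons, beq_iff_eq, hnil]
    split_ifs <;> (try subst_vars) <;> simp_all <;>
      first
        | omega
        | (constructor <;> omega)
        | tauto

lemma pv_mem_cands (q : String) (tokens : List String) (p : Nat) :
    p ∈ pvCands q tokens ↔ (p < 13 ∧ pvCondAt q tokens p = true) := by
  have hw : ∀ w, w ∈ (["thanks", "cool", "nice", "wow", "amazing", "bye", "goodbye",
      "stupid", "dumb", "idiot"] : List String) →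
      (pvGreetRoots.contains w || (PySem.Str.startswith w "hi" && decide (PySem.Str.len w ≤ 4))) = false := by
    decide
  simp only [pvCands, List.mem_append, List.mem_filterMap, List.mem_map, pvSubPriority,
    List.mem_cons, List.not_mem_nil, or_false, exists_eq_right,
    Option.ite_none_right_eq_some, Option.some.injEq, pv_tokenPriority_eq_some]
  rcases Nat.lt_or_ge p 13 with hp | hp
  · simp only [hp, true_and]
    interval_cases p <;>
      simp [pvCondAt, pvGreetRoots, List.any_eq_true, List.contains_eq_mem,
        hw "thanks" (by simp), hw "cool" (by simp), hw "nice" (by simp), hw "wow" (by simp),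
        hw "amazing" (by simp), hw "bye" (by simp), hw "goodbye" (by simp),
        hw "stupid" (by simp), hw "dumb" (by simp), hw "idiot" (by simp)] <;>
      try tauto
    · -- p = 9
      constructor
      · rintro ⟨a, ha, -, h⟩
        rcases h with rfl | rfl | rfl | rfl <;> tauto
      · rintro (((h | h) | h) | h) <;> exact ⟨_, h, by decide, by simp⟩
    · -- p = 10
      constructor
      · rintro ⟨a, ha, -, h⟩
        rcases h with rfl | rfl <;> tauto
      · rintro (h | h) <;> exact ⟨_, h, by decide, by simp⟩
    · -- p = 11
      constructor
      · rintro ⟨a, ha, -, h⟩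
        rcases h with rfl | rfl | rfl <;> tauto
      · rintro ((h | h) | h) <;> exact ⟨_, h, by decide, by simp⟩
  · constructor
    · rintro (⟨tok, -, h⟩ | h)
      · rcases h with ⟨-, h0⟩ | ⟨-, (⟨-, h'⟩ | ⟨-, h'⟩ | ⟨-, h'⟩ | ⟨-, h'⟩)⟩ <;> omega
      · obtain ⟨a, hor, -, h2⟩ := h
        exfalso
        rcases hor with rfl|rfl|rfl|rfl|rfl|rfl|rfl|rfl|rfl|rfl|rfl|rfl|rfl|rfl|rfl|rfl|rfl|rfl|rfl <;>
          simp at h2 <;> omega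
    · rintro ⟨h13, -⟩
      omega

lemma pv_chain_eq_min (c : Nat → Bool) (cands : List Nat)
    (hmem : ∀ p, p ∈ cands ↔ (p < 13 ∧ c p = true)) :
    (if c 0 then PySem.Dict.get? pvResponses 0
     else if c 1 then PySem.Dict.get? pvResponses 1
     else if c 2 then PySem.Dict.get? pvResponses 2
     else if c 3 then PySem.Dict.get? pvResponses 3
     else if c 4 then PySem.Dict.get? pvResponses 4
     else if c 5 then PySem.Dict.get? pvResponses 5
     else if c 6 then PySem.Dict.get? pvResponses 6
     else if c 7 then PySem.Dict.get? pvResponses 7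
     else if c 8 then PySem.Dict.get? pvResponses 8
     else if c 9 then PySem.Dict.get? pvResponses 9
     else if c 10 then PySem.Dict.get? pvResponses 10
     else if c 11 then PySem.Dict.get? pvResponses 11
     else if c 12 then PySem.Dict.get? pvResponses 12
     else none)
    = (if cands = [] then none
       else PySem.Dict.get? pvResponses (PySem.List.minD cands (fun x => x) 0)) := by
  by_cases hc0 : c 0 = true
  · have hmin := pv_min_eq_of cands 0 ((hmem 0).mpr ⟨by omega, hc0⟩) (fun j hj => Nat.zero_le j)
    have hne : cands ≠ [] := by
      intro hcn
      rw [hcn] at hmin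
      simp [PySem.List.min?] at hmin
    rw [if_pos hc0, if_neg hne]
    simp [PySem.List.minD, hmin]
  · rw [if_neg hc0]
    by_cases hc1 : c 1 = true
    · have hmin := pv_min_eq_of cands 1 ((hmem 1).mpr ⟨by omega, hc1⟩)
        (fun j hj => by
          obtain ⟨hj13, hcj⟩ := (hmem j).mp hj
          by_contra hlt
          push_neg at hlt
          interval_cases j <;> first | omega | simp_all)
      have hne : cands ≠ [] := by
        intro hcn
        rw [hcn] at hmin
        simp [PySem.List.min?] at hmin
      rw [if_pos hc1, if_neg hne]
      simp [PySem.List.minD, hmin]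
    · rw [if_neg hc1]
      by_cases hc2 : c 2 = true
      · have hmin := pv_min_eq_of cands 2 ((hmem 2).mpr ⟨by omega, hc2⟩)
          (fun j hj => by
            obtain ⟨hj13, hcj⟩ := (hmem j).mp hj
            by_contra hlt
            push_neg at hlt
            interval_cases j <;> first | omega | simp_all)
        have hne : cands ≠ [] := by
          intro hcn
          rw [hcn] at hmin
          simp [PySem.List.min?] at hmin
        rw [if_pos hc2, if_neg hne]
        simp [PySem.List.minD, hmin]
      · rw [if_neg hc2]
        by_cases hc3 : c 3 = true
        · have hmin := pv_min_eq_of cands 3 ((hmem 3).mpr ⟨by omega, hc3⟩)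
            (fun j hj => by
              obtain ⟨hj13, hcj⟩ := (hmem j).mp hj
              by_contra hlt
              push_neg at hlt
              interval_cases j <;> first | omega | simp_all)
          have hne : cands ≠ [] := by
            intro hcn
            rw [hcn] at hmin
            simp [PySem.List.min?] at hmin
          rw [if_pos hc3, if_neg hne]
          simp [PySem.List.minD, hmin]
        · rw [if_neg hc3]
          by_cases hc4 : c 4 = true
          · have hmin := pv_min_eq_of cands 4 ((hmem 4).mpr ⟨by omega, hc4⟩)
              (fun j hj => by
                obtain ⟨hj13, hcj⟩ := (hmem j).mp hj
                by_contra hlt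
                push_neg at hlt
                interval_cases j <;> first | omega | simp_all)
            have hne : cands ≠ [] := by
              intro hcn
              rw [hcn] at hmin
              simp [PySem.List.min?] at hmin
            rw [if_pos hc4, if_neg hne]
            simp [PySem.List.minD, hmin]
          · rw [if_neg hc4]
            by_cases hc5 : c 5 = true
            · have hmin := pv_min_eq_of cands 5 ((hmem 5).mpr ⟨by omega, hc5⟩)
                (fun j hj => by
                  obtain ⟨hj13, hcj⟩ := (hmem j).mp hj
                  by_contra hlt
                  push_neg at hlt
                  interval_cases j <;> first | omega | simp_all)
              have hne : cands ≠ [] := by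
                intro hcn
                rw [hcn] at hmin
                simp [PySem.List.min?] at hmin
              rw [if_pos hc5, if_neg hne]
              simp [PySem.List.minD, hmin]
            · rw [if_neg hc5]
              by_cases hc6 : c 6 = true
              · have hmin := pv_min_eq_of cands 6 ((hmem 6).mpr ⟨by omega, hc6⟩)
                  (fun j hj => by
                    obtain ⟨hj13, hcj⟩ := (hmem j).mp hj
                    by_contra hlt
                    push_neg at hlt
                    interval_cases j <;> first | omega | simp_all)
                have hne : cands ≠ [] := by
                  intro hcn
                  rw [hcn] at hmin
                  simp [PySem.List.min?] at hmin
                rw [if_pos hc6, if_neg hne]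
                simp [PySem.List.minD, hmin]
              · rw [if_neg hc6]
                by_cases hc7 : c 7 = true
                · have hmin := pv_min_eq_of cands 7 ((hmem 7).mpr ⟨by omega, hc7⟩)
                    (fun j hj => by
                      obtain ⟨hj13, hcj⟩ := (hmem j).mp hj
                      by_contra hlt
                      push_neg at hlt
                      interval_cases j <;> first | omega | simp_all)
                  have hne : cands ≠ [] := by
                    intro hcn
                    rw [hcn] at hmin
                    simp [PySem.List.min?] at hmin
                  rw [if_pos hc7, if_neg hne]
                  simp [PySem.List.minD, hmin]
                · rw [if_neg hc7]
                  by_cases hc8 : c 8 = true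
                  · have hmin := pv_min_eq_of cands 8 ((hmem 8).mpr ⟨by omega, hc8⟩)
                      (fun j hj => by
                        obtain ⟨hj13, hcj⟩ := (hmem j).mp hj
                        by_contra hlt
                        push_neg at hlt
                        interval_cases j <;> first | omega | simp_all)
                    have hne : cands ≠ [] := by
                      intro hcn
                      rw [hcn] at hmin
                      simp [PySem.List.min?] at hmin
                    rw [if_pos hc8, if_neg hne]
                    simp [PySem.List.minD, hmin]
                  · rw [if_neg hc8]
                    by_cases hc9 : c 9 = true
                    · have hmin := pv_min_eq_of cands 9 ((hmem 9).mpr ⟨by omega, hc9⟩)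
                        (fun j hj => by
                          obtain ⟨hj13, hcj⟩ := (hmem j).mp hj
                          by_contra hlt
                          push_neg at hlt
                          interval_cases j <;> first | omega | simp_all)
                      have hne : cands ≠ [] := by
                        intro hcn
                        rw [hcn] at hmin
                        simp [PySem.List.min?] at hmin
                      rw [if_pos hc9, if_neg hne]
                      simp [PySem.List.minD, hmin]
                    · rw [if_neg hc9]
                      by_cases hc10 : c 10 = true
                      · have hmin := pv_min_eq_of cands 10 ((hmem 10).mpr ⟨by omega, hc10⟩)
                          (fun j hj => by
                            obtain ⟨hj13, hcj⟩ := (hmem j).mp hj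
                            by_contra hlt
                            push_neg at hlt
                            interval_cases j <;> first | omega | simp_all)
                        have hne : cands ≠ [] := by
                          intro hcn
                          rw [hcn] at hmin
                          simp [PySem.List.min?] at hmin
                        rw [if_pos hc10, if_neg hne]
                        simp [PySem.List.minD, hmin]
                      · rw [if_neg hc10]
                        by_cases hc11 : c 11 = true
                        · have hmin := pv_min_eq_of cands 11 ((hmem 11).mpr ⟨by omega, hc11⟩)
                            (fun j hj => by
                              obtain ⟨hj13, hcj⟩ := (hmem j).mp hj
                              by_contra hlt
                              push_neg at hlt
                              interval_cases j <;> first | omega | simp_all)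
                          have hne : cands ≠ [] := by
                            intro hcn
                            rw [hcn] at hmin
                            simp [PySem.List.min?] at hmin
                          rw [if_pos hc11, if_neg hne]
                          simp [PySem.List.minD, hmin]
                        · rw [if_neg hc11]
                          by_cases hc12 : c 12 = true
                          · have hmin := pv_min_eq_of cands 12 ((hmem 12).mpr ⟨by omega, hc12⟩)
                              (fun j hj => by
                                obtain ⟨hj13, hcj⟩ := (hmem j).mp hj
                                by_contra hlt
                                push_neg at hlt
                                interval_cases j <;> first | omega | simp_all)
                            have hne : cands ≠ [] := by
                              intro hcn
                              rw [hcn] at hmin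
                              simp [PySem.List.min?] at hmin
                            rw [if_pos hc12, if_neg hne]
                            simp [PySem.List.minD, hmin]
                          · rw [if_neg hc12]
                            have hnil : cands = [] := List.eq_nil_iff_forall_not_mem.mpr (fun p hp => by
                              obtain ⟨h13, hc⟩ := (hmem p).mp hp
                              interval_cases p <;> simp_all)
                            rw [hnil]
                            simp

-- ===== VERDICT (by name: the statement is the Claim_ definition above) =====
lemma pv_main (q : String) (tokens : PySem.Set String) :
  (if tokens.any (fun tok =>
      ["hi", "hello", "hey", "greetings", "hola", "namaste"].contains tok ||
      (PySem.Str.startswith tok "hi" && decide (PySem.Str.len tok ≤ 4))) then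
    some "Hello! I'm your AI jewelry assistant. I can help you find necklaces, rings, earrings, and more. What are you looking for today?"
  else if PySem.Str.isIn "help" q || PySem.Str.isIn "what can you do" q then
    some "I can help you find jewelry based on your preferences. Try asking for 'gold earrings for a wedding' or 'diamond necklace under 50,000'."
  else if PySem.Str.isIn "thank" q || tokens.contains "thanks" then
    some "You're welcome! Let me know if you'd like to see more options."
  else if PySem.Str.isIn "how are you" q then
    some "I'm doing great, thanks for asking! I'm ready to help you find the perfect piece of jewelry."
  else if PySem.Str.isIn "who are you" q || PySem.Str.isIn "what are you" q then
    some "I am an intelligent assistant designed to help you explore our exclusive jewelry collection."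
  else if PySem.Str.isIn "time" q || PySem.Str.isIn "hour" q || PySem.Str.isIn "open" q then
    some "We are open Monday to Saturday from 10 AM to 8 PM. Our online store is open 24/7."
  else if PySem.Str.isIn "location" q || PySem.Str.isIn "address" q || PySem.Str.isIn "where" q then
    some "We are located at 123 Jewelry Lane, Mumbai. You can also find us online at www.aijewelry.com."
  else if PySem.Str.isIn "return" q || PySem.Str.isIn "policy" q || PySem.Str.isIn "refund" q then
    some "We offer a 30-day no-questions-asked return policy on all unworn items with original tags."
  else if PySem.Str.isIn "call" q || PySem.Str.isIn "phone" q || PySem.Str.isIn "contact" q then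
    some "You are speaking with our AI representative right now. For human support, please email support@aijewelry.com."
  else if tokens.contains "cool" || tokens.contains "nice" || tokens.contains "wow" || tokens.contains "amazing" then
    some "I'm glad you like it! Our collection is truly special."
  else if tokens.contains "bye" || tokens.contains "goodbye" then
    some "Goodbye! Have a wonderful day."
  else if tokens.contains "stupid" || tokens.contains "dumb" || tokens.contains "idiot" then
    some "I'm still learning and doing my best to help you. Let's try finding some jewelry instead."
  else if PySem.Str.isIn "love you" q then
    some "That's very kind of you! I love helping you find beautiful things."
  else
    none)
  = (if ((tokens.map pvTokenPriority).filterMap (fun p => p)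
        ++ pvSubPriority.filterMap (fun kp => if PySem.Str.isIn kp.1 q then some kp.2 else none)) = [] then none
     else PySem.Dict.get? pvResponses (PySem.List.minD
        ((tokens.map pvTokenPriority).filterMap (fun p => p)
          ++ pvSubPriority.filterMap (fun kp => if PySem.Str.isIn kp.1 q then some kp.2 else none))
        (fun x => x) 0)) := by
  exact pv_chain_eq_min (pvCondAt q tokens) (pvCands q tokens) (pv_mem_cands q tokens)

theorem get_generic_response_spec : Claim_equal_get_generic_response := by
  intro query _
  show get_generic_response query = get_generic_response_alt query
  unfold get_generic_response get_generic_response_alt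
  dsimp only []
  rw [pv_main]
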